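-- pv_equiv track=rewrite | github.com/jcalebsmith/proposal-rcdc-assignment | rcdc-classifier.py | apply_keyword_rules
-- ===== SOURCE A (Python) =====
-- from typing import Dict, List, Optional, Sequence, Tuple
--
-- def apply_keyword_rules(
--     text: str,
--     rules: Dict[str, List[str]],
--     valid_categories: set,
-- ) -> List[str]:
--     """
--     Check text against keyword rules and return list of categories that should be assigned.
--     Only returns categories that exist in the valid_categories set.
--     """
--     if not text:
--         return []
--
--     text_lower = text.lower()
--     return [
--         category
--         for category, keywords in rules.items()
--         if category in valid_categories and any(kw in text_lower for kw in keywords)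
--     ]
-- ===== SOURCE B (Python) =====
-- def apply_keyword_rules(text, rules, valid_categories):
--     if not text:
--         return []
--     t = text.lower()
--     # phase 1: the set of keywords (of valid categories) occurring in the lowered text,
--     # each distinct keyword tested once
--     occurring = {kw for c, kws in rules.items() if c in valid_categories
--                  for kw in kws if kw in t}
--     # phase 2: one pass over the rules, a set-disjointness test per category
--     return [c for c, kws in rules.items()
--             if c in valid_categories and not occurring.isdisjoint(kws)]
-- ===== Notes on version B (the rewrite author's own statement) =====
-- stated objective: alternative
-- what changed: Two-phase decomposition: first compute, in one pass over the valid rules, the set of distinct keywords that occur in the lowered text (each distinct keyword tested once), then select categories by a set-disjointness test, instead of A's single comprehension with a nested any-of-substring scan per category.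
import Mathlib
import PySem

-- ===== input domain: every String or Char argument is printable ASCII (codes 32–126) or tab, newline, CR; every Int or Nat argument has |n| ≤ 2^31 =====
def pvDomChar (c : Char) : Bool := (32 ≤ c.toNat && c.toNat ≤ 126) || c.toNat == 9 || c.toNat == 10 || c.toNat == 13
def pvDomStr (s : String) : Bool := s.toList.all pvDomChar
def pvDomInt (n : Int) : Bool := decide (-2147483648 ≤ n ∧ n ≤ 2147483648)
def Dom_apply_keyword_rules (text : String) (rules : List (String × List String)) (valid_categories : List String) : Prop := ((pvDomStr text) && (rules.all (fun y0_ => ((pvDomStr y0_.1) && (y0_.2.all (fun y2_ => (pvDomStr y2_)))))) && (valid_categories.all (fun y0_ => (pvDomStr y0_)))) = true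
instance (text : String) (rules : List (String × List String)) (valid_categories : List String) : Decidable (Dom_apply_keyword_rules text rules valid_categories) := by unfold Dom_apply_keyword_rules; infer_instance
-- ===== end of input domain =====

-- B replaces A's nested any-of-substring scan per category by a two-phase pass:
-- first the set of occurring keywords, then a set-disjointness test per category (objective: alternative).


-- ===== PORT A =====
-- literal port of A: empty-text guard, then one comprehension over rules.items()
-- keeping a category iff it is valid and some keyword is a substring of the lowered text
def apply_keyword_rules (text : String) (rules : List (String × List String)) (valid_categories : List String) : List String :=
  if text = "" then []
  else
    let text_lower := PySem.Str.lower text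
    rules.foldr (fun p acc =>
      if PySem.Set.contains valid_categories p.1
          && p.2.any (fun kw => PySem.Str.isIn kw text_lower)
      then p.1 :: acc else acc) []

-- ===== PORT B =====
-- port of B: phase 1 builds the set of keywords occurring in the lowered text,
-- phase 2 filters rules by validity and non-disjointness with that set
def apply_keyword_rules_alt (text : String) (rules : List (String × List String)) (valid_categories : List String) : List String :=
  if text = "" then []
  else
    let t := PySem.Str.lower text
    let occurring : PySem.Set String :=
      PySem.Set.ofList
        (((rules.filter (fun p => PySem.Set.contains valid_categories p.1)).flatMap
            (fun p => p.2)).filter (fun kw => PySem.Str.isIn kw t))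
    (rules.filter (fun p =>
        PySem.Set.contains valid_categories p.1
          && !(PySem.Set.isdisjoint occurring p.2))).map Prod.fst

-- ===== PRECONDITION & SPEC =====
def Spec_apply_keyword_rules (text : String) (rules : List (String × List String)) (valid_categories : List String) (out : List String) : Prop := out = apply_keyword_rules_alt text rules valid_categories
instance (text : String) (rules : List (String × List String)) (valid_categories : List String) (out : List String) : Decidable (Spec_apply_keyword_rules text rules valid_categories out) := by unfold Spec_apply_keyword_rules; infer_instance

-- ===== CLAIM (what is proved, stated in full; the proofs are below) =====
def Claim_equal_apply_keyword_rules : Prop := ∀ (text : String) (rules : List (String × List String)) (valid_categories : List String), Dom_apply_keyword_rules text rules valid_categories → Spec_apply_keyword_rules text rules valid_categories (apply_keyword_rules text rules valid_categories)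

-- ===== LEMMAS AND PROOFS =====

-- A's comprehension-shaped foldr is filter-then-map
theorem foldr_if_cons_eq_filter_map {α β : Type} (f : α × β → Bool) (l : List (α × β)) :
    l.foldr (fun p acc => if f p then p.1 :: acc else acc) [] = (l.filter f).map Prod.fst := by
  induction l with
  | nil => rfl
  | cons hd tl ih =>
    simp only [List.foldr_cons, List.filter_cons, ih]
    by_cases h : f hd <;> simp [h]

-- for a rule present in `rules`, non-disjointness with the occurring set is A's `any` test
-- (phase 1 ranges over the keywords of VALID rules, so `hv` is needed)
theorem not_isdisjoint_eq_any (t : String) (rules : List (String × List String))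
    (valid_categories : List String)
    (p : String × List String) (hp : p ∈ rules)
    (hv : PySem.Set.contains valid_categories p.1 = true) :
    (!(PySem.Set.isdisjoint
        (PySem.Set.ofList
          (((rules.filter (fun p => PySem.Set.contains valid_categories p.1)).flatMap
              (fun p => p.2)).filter (fun kw => PySem.Str.isIn kw t)))
        p.2))
      = p.2.any (fun kw => PySem.Str.isIn kw t) := by
  apply Bool.eq_iff_iff.mpr
  simp only [Bool.not_eq_eq_eq_not, Bool.not_true, ← Bool.not_eq_true,
    PySem.Set.isdisjoint_iff, PySem.Set.mem_ofList, List.mem_filter, List.any_eq_true]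
  constructor
  · intro h
    push Not at h
    obtain ⟨x, ⟨_, hin⟩, hmem⟩ := h
    exact ⟨x, hmem, hin⟩
  · intro ⟨kw, hmem, hin⟩ h
    exact h kw ⟨List.mem_flatMap.mpr ⟨p, List.mem_filter.mpr ⟨hp, hv⟩, hmem⟩, hin⟩ hmem

-- ===== VERDICT (by name: the statement is the Claim_ definition above) =====
theorem apply_keyword_rules_spec : Claim_equal_apply_keyword_rules := by
  intro text rules valid_categories _
  unfold Spec_apply_keyword_rules apply_keyword_rules apply_keyword_rules_alt
  by_cases h : text = ""
  · simp [h]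
  · simp only [h, ite_false]
    rw [foldr_if_cons_eq_filter_map]
    congr 1
    apply List.filter_congr
    intro p hp
    by_cases hv : PySem.Set.contains valid_categories p.1 = true
    · rw [not_isdisjoint_eq_any _ _ _ _ hp hv]
    · have hv' : p.1 ∉ valid_categories := by simpa using hv
      simp [hv']
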